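-- pv_equiv track=rewrite | github.com/khelwood/advent-of-code | 2015/17_toomuch.py | iter_combinations
-- ===== SOURCE A (Python) =====
-- def iter_combinations(sizes, total):
--     if total==0:
--         yield ()
--         return
--     if len(sizes)==1:
--         if total==sizes[0]:
--             yield (total,)
--         return
--     size = sizes[0]
--     rest = sizes[1:]
--     yield from iter_combinations(rest, total)
--     if size <= total:
--         size_tuple = (size,)
--         for combo in iter_combinations(rest, total-size):
--             yield size_tuple + combo
-- ===== SOURCE B (Python) =====
-- def iter_combinations(sizes, total):
--     # Iterative DFS with an explicit stack of (remaining_sizes, remaining_total, prefix) frames.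
--     stack = [(sizes, total, ())]
--     while stack:
--         rem, t, prefix = stack.pop()
--         if t == 0:
--             yield prefix
--         elif len(rem) == 1:
--             if t == rem[0]:
--                 yield prefix + (t,)
--         else:
--             size = rem[0]
--             rest = rem[1:]
--             if size <= t:
--                 stack.append((rest, t - size, prefix + (size,)))
--             stack.append((rest, t, prefix))
-- ===== Notes on version B (the rewrite author's own statement) =====
-- stated objective: alternative
-- what changed: Replaces the nested generator recursion (yield from / inner for over recursive calls) by an iterative depth-first search over an explicit LIFO stack of (remaining_sizes, remaining_total, prefix) frames that yields completed prefixes directly.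
import Mathlib
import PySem

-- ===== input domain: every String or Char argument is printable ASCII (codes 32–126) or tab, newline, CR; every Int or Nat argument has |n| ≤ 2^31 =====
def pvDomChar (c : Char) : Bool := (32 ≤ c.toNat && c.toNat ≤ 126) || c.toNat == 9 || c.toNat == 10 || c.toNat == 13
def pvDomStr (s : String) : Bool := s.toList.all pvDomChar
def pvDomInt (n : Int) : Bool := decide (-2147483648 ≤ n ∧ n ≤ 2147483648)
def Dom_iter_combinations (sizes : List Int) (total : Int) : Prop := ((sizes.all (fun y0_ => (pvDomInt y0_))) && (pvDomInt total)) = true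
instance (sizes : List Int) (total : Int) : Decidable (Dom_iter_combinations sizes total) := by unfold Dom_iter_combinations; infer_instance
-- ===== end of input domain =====

-- B replaces A's nested generator recursion by an explicit-stack iterative DFS (alternative decomposition, same cost).


-- ===== PORT A =====
-- Literal port of the recursive generator: the yields are collected in order.
def iter_combinations (sizes : List Int) (total : Int) : List (List Int) :=
  if total = 0 then [[]]
  else if sizes.length = 1 then
    if total = (PySem.List.pyGet? sizes 0).getD 0 then [[total]] else []
  else
    match sizes with
    | [] => []  -- Python raises IndexError here (sizes[0]); excluded by Pre_
    | size :: rest =>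
      iter_combinations rest total ++
        (if size ≤ total then (iter_combinations rest (total - size)).map (fun c => size :: c)
         else [])

-- ===== PORT B =====
-- termination measure for the DFS stack (used by the port's decreasing_by)
def pvStackMeasure (st : List (List Int × Int × List Int)) : Nat :=
  (st.map (fun f => 3 ^ f.1.length)).sum

-- Explicit-stack DFS: head of the list is the top of the stack (last pushed, first popped).
def pvDfs : List (List Int × Int × List Int) → List (List Int)
  | [] => []
  | (rem, t, pfx) :: stack =>
    if t = 0 then pfx :: pvDfs stack
    else if rem.length = 1 then
      (if t = (PySem.List.pyGet? rem 0).getD 0 then [pfx ++ [t]] else []) ++ pvDfs stack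
    else
      match rem with
      | [] => pvDfs stack  -- Python raises IndexError here (rem[0]); excluded by Pre_
      | size :: rest =>
        -- push include-frame first (when size ≤ t), then skip-frame last so it is popped first
        pvDfs ((rest, t, pfx) ::
          ((if size ≤ t then [(rest, t - size, pfx ++ [size])] else []) ++ stack))
  termination_by st => pvStackMeasure st
  decreasing_by
  all_goals simp [pvStackMeasure]
  all_goals
    have h1 : 1 ≤ 3 ^ rest.length := Nat.one_le_pow _ _ (by norm_num)
    split <;> simp [pow_succ]
    omega

def iter_combinations_alt (sizes : List Int) (total : Int) : List (List Int) :=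
  pvDfs [(sizes, total, [])]

-- ===== PRECONDITION & SPEC =====
-- Pre_ excludes exactly the inputs on which Python A raises IndexError: empty sizes with nonzero total.
def Pre_iter_combinations (sizes : List Int) (total : Int) : Prop :=
  sizes ≠ [] ∨ total = 0
instance (sizes : List Int) (total : Int) : Decidable (Pre_iter_combinations sizes total) := by
  unfold Pre_iter_combinations; infer_instance

def pvWitness_iter_combinations : List Int × Int := ([2, 3, 5], 5)

def Spec_iter_combinations (sizes : List Int) (total : Int) (out : List (List Int)) : Prop := out = iter_combinations_alt sizes total
instance (sizes : List Int) (total : Int) (out : List (List Int)) : Decidable (Spec_iter_combinations sizes total out) := by unfold Spec_iter_combinations; infer_instance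

-- ===== CLAIM (what is proved, stated in full; the proofs are below) =====
def Claim_equal_iter_combinations : Prop := ∀ (sizes : List Int) (total : Int), Dom_iter_combinations sizes total → Pre_iter_combinations sizes total → Spec_iter_combinations sizes total (iter_combinations sizes total)

-- ===== LEMMAS AND PROOFS =====

-- The DFS invariant: processing a frame contributes A's recursive result prefixed by pfx,
-- followed by the rest of the stack.
theorem pvDfs_frame (sizes : List Int) :
    ∀ (t : Int) (pfx : List Int) (stack : List (List Int × Int × List Int)),
      pvDfs ((sizes, t, pfx) :: stack)
        = (iter_combinations sizes t).map (fun c => pfx ++ c) ++ pvDfs stack := by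
  induction sizes with
  | nil =>
    intro t pfx stack
    by_cases h0 : t = 0
    · simp [pvDfs, iter_combinations, h0]
    · simp [pvDfs, iter_combinations, h0]
  | cons size rest ih =>
    intro t pfx stack
    by_cases h0 : t = 0
    · simp [pvDfs, iter_combinations, h0]
    · match rest with
      | [] =>
        by_cases he : t = size
        · subst he
          simp [pvDfs, iter_combinations, h0, PySem.List.pyGet?, PySem.List.pyIdx?]
        · simp [pvDfs, iter_combinations, h0, he, PySem.List.pyGet?, PySem.List.pyIdx?]
      | r :: rs =>
        rw [show pvDfs ((size :: r :: rs, t, pfx) :: stack)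
            = pvDfs ((r :: rs, t, pfx) ::
                ((if size ≤ t then [(r :: rs, t - size, pfx ++ [size])] else []) ++ stack))
          from by rw [pvDfs]; simp [h0]]
        rw [ih]
        by_cases hle : size ≤ t
        · simp only [hle, if_pos, List.singleton_append]
          rw [ih]
          simp [iter_combinations, h0, hle]
        · simp only [hle, if_neg, not_false_iff, List.nil_append]
          simp [iter_combinations, h0, hle]

-- ===== VERDICT (by name: the statement is the Claim_ definition above) =====
theorem iter_combinations_spec : Claim_equal_iter_combinations := by
  intro sizes total _ _
  unfold Spec_iter_combinations iter_combinations_alt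
  rw [pvDfs_frame]
  simp [pvDfs]
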